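-- pv_equiv track=rewrite | github.com/natefduncan/housing | housing/spiders/housing_spiders.py | parse_bottom
-- ===== SOURCE A (Python) =====
-- def parse_bottom(x): #For Realtor
--     '''
--     status, price/sq_ft,on realtor, type, built, style, description
--     '''
--
--     status = ""
--     price_sq_ft = ""
--     on_realtor = ""
--     tp = ""
--     built = ""
--
--     mx = max([len(i) for i in x])
--
--     for i in range(0, len(x)):
--         temp = x[i]
--         temp = temp.replace("\n", "").replace(",", "").replace(r"\u", "").strip()
--         if temp == "Status":
--             status = x[i+1].replace("\n", "").replace(",", "").replace(r"\u", "").strip()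
--         elif temp == "Price/Sq Ft":
--             price_sq_ft = x[i+1].replace("\n", "").replace(",", "").replace("$","").replace(r"\u", "").strip()
--         elif temp == "On realtor.com":
--             on_realtor = x[i+1].replace("\n", "").replace(",", "").replace(r"\u", "").strip()
--         elif temp == "Type":
--             tp = x[i+1].replace("\n", "").replace(",", "").replace(r"\u", "").strip()
--         elif temp == "Built":
--             built = x[i+1].replace("\n", "").replace(",", "").replace(r"\u", "").strip()
--     return [status, price_sq_ft, on_realtor, tp, built]
-- ===== SOURCE B (Python) =====
-- # Alternative decomposition: instead of one forward pass maintaining five accumulators,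
-- # do one independent backward search per field over adjacent pairs (first match from the
-- # end == A's last-overwrite winner) and clean only the winner; the vestigial
-- # mx = max(...) line is dropped.  A raises on empty input (ValueError) and on a trailing
-- # label (IndexError on x[i+1]); those inputs are outside Pre_ and B returns the fields.
--
-- _FIELDS = (("Status", False), ("Price/Sq Ft", True), ("On realtor.com", False),
--            ("Type", False), ("Built", False))
--
--
-- def _clean(s):
--     return s.replace("\n", "").replace(",", "").replace(r"\u", "").strip()
--
--
-- def _clean_price(s):
--     return s.replace("\n", "").replace(",", "").replace("$", "").replace(r"\u", "").strip()
--
--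
-- def _last_value_after(x, label):
--     # scan adjacent pairs back-to-front; first hit is A's last occurrence
--     for lab, val in reversed(list(zip(x, x[1:]))):
--         if _clean(lab) == label:
--             return val
--     return ""
--
--
-- def parse_bottom(x):
--     return [(_clean_price if dollar else _clean)(_last_value_after(x, label))
--             for label, dollar in _FIELDS]
-- ===== Notes on version B (the rewrite author's own statement) =====
-- stated objective: alternative
-- what changed: Replaces A's single forward index loop that maintains five accumulators (later matches overwriting earlier ones via x[i+1]) by five independent backward searches over the adjacent-pair list, each returning the first match from the end and cleaning only that winner; the vestigial mx = max(...) line is dropped.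
-- outside the precondition, e.g. on parse_bottom([]): A raises ValueError, B returns ['', '', '', '', '']; on parse_bottom(['Status']): A raises IndexError, B returns ['', '', '', '', '']
import Mathlib
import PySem

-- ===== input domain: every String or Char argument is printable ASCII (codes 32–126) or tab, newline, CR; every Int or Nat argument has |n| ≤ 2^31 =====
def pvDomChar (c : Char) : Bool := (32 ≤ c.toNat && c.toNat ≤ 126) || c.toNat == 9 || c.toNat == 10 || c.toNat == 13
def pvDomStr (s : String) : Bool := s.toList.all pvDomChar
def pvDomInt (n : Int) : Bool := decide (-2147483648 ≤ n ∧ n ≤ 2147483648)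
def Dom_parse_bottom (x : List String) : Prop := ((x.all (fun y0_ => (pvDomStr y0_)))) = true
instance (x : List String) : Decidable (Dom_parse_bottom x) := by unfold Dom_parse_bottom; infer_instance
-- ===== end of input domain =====

-- B replaces A's forward accumulator loop by five independent backward searches over the
-- adjacent-pair list (first match from the end = A's last overwrite); equal return values on Pre_.

-- cleaning chain shared verbatim by both Pythons: .replace("\n","").replace(",","").replace("\u","").strip()
def pbClean (s : String) : String :=
  PySem.Str.strip (PySem.Str.replace (PySem.Str.replace (PySem.Str.replace s "\n" "") "," "") "\\u" "")

-- the Price/Sq Ft variant with the extra .replace("$","") in A's order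
def pbCleanPrice (s : String) : String :=
  PySem.Str.strip (PySem.Str.replace (PySem.Str.replace (PySem.Str.replace (PySem.Str.replace s "\n" "") "," "") "$" "") "\\u" "")

structure PBState where
  status : String
  price : String
  onr : String
  tp : String
  built : String
deriving Repr, DecidableEq

-- ===== PORT A =====
-- loop body of A: x[i] and x[i+1] are read with pyGetD ""; Pre_ guarantees x[i] is in range
-- and that x[i+1] is read (branch taken) only when in range, so the "" default is never the value used
def pbStepA (x : List String) (s : PBState) (i : Int) : PBState :=
  let temp := pbClean (PySem.List.pyGetD x i "")
  if temp = "Status" then { s with status := pbClean (PySem.List.pyGetD x (i+1) "") }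
  else if temp = "Price/Sq Ft" then { s with price := pbCleanPrice (PySem.List.pyGetD x (i+1) "") }
  else if temp = "On realtor.com" then { s with onr := pbClean (PySem.List.pyGetD x (i+1) "") }
  else if temp = "Type" then { s with tp := pbClean (PySem.List.pyGetD x (i+1) "") }
  else if temp = "Built" then { s with built := pbClean (PySem.List.pyGetD x (i+1) "") }
  else s

def parse_bottom (x : List String) : List String :=
  -- vestigial 'mx = max([len(i) for i in x])': ValueError on [] is excluded by Pre_
  let _mx := PySem.List.max? (x.map (fun i => PySem.Str.len i)) (fun v => v)
  let st := (PySem.List.pyRange 0 (PySem.List.len x)).foldl (pbStepA x) ⟨"", "", "", "", ""⟩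
  [st.status, st.price, st.onr, st.tp, st.built]

-- ===== PORT B =====
-- backward search with early return: first pair from the end whose cleaned label matches
def pbLastVal (x : List String) (label : String) : String :=
  match ((x.zip (PySem.List.slice x (some 1))).reverse).find? (fun p => pbClean p.1 == label) with
  | some p => p.2
  | none => ""

def parse_bottom_alt (x : List String) : List String :=
  [pbClean (pbLastVal x "Status"),
   pbCleanPrice (pbLastVal x "Price/Sq Ft"),
   pbClean (pbLastVal x "On realtor.com"),
   pbClean (pbLastVal x "Type"),
   pbClean (pbLastVal x "Built")]

-- ===== PRECONDITION & SPEC =====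
def pbLabels : List String := ["Status", "Price/Sq Ft", "On realtor.com", "Type", "Built"]

-- Pre_ excludes exactly the inputs on which A raises: the empty list (max([]) is a ValueError)
-- and lists whose cleaned last element is one of the five labels (x[i+1] is an IndexError there).
def Pre_parse_bottom (x : List String) : Prop :=
  x ≠ [] ∧ pbClean (x.getLastD "") ∉ pbLabels
instance (x : List String) : Decidable (Pre_parse_bottom x) := by unfold Pre_parse_bottom; infer_instance

def pvWitness_parse_bottom : List String := ["Status", " Active\n", "Built", "1984"]

def Spec_parse_bottom (x : List String) (out : List String) : Prop := out = parse_bottom_alt x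
instance (x : List String) (out : List String) : Decidable (Spec_parse_bottom x out) := by unfold Spec_parse_bottom; infer_instance

-- ===== CLAIM (what is proved, stated in full; the proofs are below) =====
def Claim_equal_parse_bottom : Prop := ∀ (x : List String), Dom_parse_bottom x → Pre_parse_bottom x → Spec_parse_bottom x (parse_bottom x)

-- ===== LEMMAS AND PROOFS =====

-- A's loop body as a function of the adjacent pair (x[i], x[i+1])
def pbStep2 (s : PBState) (p : String × String) : PBState :=
  let temp := pbClean p.1
  if temp = "Status" then { s with status := pbClean p.2 }
  else if temp = "Price/Sq Ft" then { s with price := pbCleanPrice p.2 }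
  else if temp = "On realtor.com" then { s with onr := pbClean p.2 }
  else if temp = "Type" then { s with tp := pbClean p.2 }
  else if temp = "Built" then { s with built := pbClean p.2 }
  else s

-- B's backward search, on a pair list
def pbG (l : List (String × String)) (lab : String) : String :=
  match (l.reverse).find? (fun p => pbClean p.1 == lab) with
  | some p => p.2
  | none => ""

theorem pbStepA_eq (x : List String) (s : PBState) (i : Int) :
    pbStepA x s i = pbStep2 s (PySem.List.pyGetD x i "", PySem.List.pyGetD x (i+1) "") := rfl

theorem pbZipLen (x : List String) : (x.zip (x.tail ++ [""])).length = x.length := by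
  cases x <;> simp

theorem pbZipGet : ∀ (x : List String) (j : Nat), j < x.length →
    (x.zip (x.tail ++ [""])).getD j ("", "") = (x.getD j "", x.getD (j+1) "") := by
  intro x
  induction x with
  | nil => intro j h; simp at h
  | cons a t ih =>
    intro j hj
    cases t with
    | nil =>
      have hj0 : j = 0 := by simp at hj; omega
      subst hj0
      simp
    | cons b u =>
      cases j with
      | zero => simp
      | succ j =>
        have := ih j (by simpa using Nat.lt_of_succ_lt_succ hj)
        simpa using this

theorem pbZipSplit : ∀ (x : List String), x ≠ [] →
    x.zip (x.tail ++ [""]) = x.zip x.tail ++ [(x.getLastD "", "")] := by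
  intro x
  induction x with
  | nil => intro h; exact absurd rfl h
  | cons a t ih =>
    intro _
    cases t with
    | nil => simp
    | cons b u =>
      have := ih (by simp)
      simp only [List.tail_cons] at this ⊢
      simp [List.zip_cons_cons, this]

theorem pbStep2_last (s : PBState) (v : String) (hv : pbClean v ∉ pbLabels) :
    pbStep2 s (v, "") = s := by
  simp only [pbLabels, List.mem_cons, List.not_mem_nil, or_false, not_or] at hv
  obtain ⟨n1, n2, n3, n4, n5⟩ := hv
  simp only [pbStep2]
  rw [if_neg n1, if_neg n2, if_neg n3, if_neg n4, if_neg n5]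

-- A's index fold equals the fold of pbStep2 over the padded adjacent-pair list
theorem pbFoldA_eq (x : List String) (s0 : PBState) :
    (PySem.List.pyRange 0 (PySem.List.len x)).foldl (pbStepA x) s0 =
      (x.zip (x.tail ++ [""])).foldl pbStep2 s0 := by
  have hlen : PySem.List.len x = PySem.List.len (x.zip (x.tail ++ [""])) := by
    simp only [PySem.List.len]
    rw [pbZipLen]
  have hcongr : ∀ (s : PBState), ∀ i ∈ PySem.List.pyRange 0 (PySem.List.len x),
      pbStepA x s i = pbStep2 s (PySem.List.pyGetD (x.zip (x.tail ++ [""])) i ("", "")) := by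
    intro s i hi
    rw [PySem.List.mem_pyRange_one] at hi
    obtain ⟨h0, h1⟩ := hi
    have hjx : i.toNat < x.length := by
      simp only [PySem.List.len] at h1; omega
    rw [pbStepA_eq]
    rw [PySem.List.pyGetD_of_nonneg _ _ h0, PySem.List.pyGetD_of_nonneg _ _ (by omega : (0:Int) ≤ i),
        PySem.List.pyGetD_of_nonneg _ _ (by omega : (0:Int) ≤ i + 1)]
    have ht : (i + 1).toNat = i.toNat + 1 := by omega
    rw [ht, pbZipGet x i.toNat hjx]
  rw [PySem.List.foldl_congr_mem _ _ _ _ hcongr, hlen]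
  exact PySem.List.foldl_pyRange_pyGetD (x.zip (x.tail ++ [""])) ("", "") pbStep2 s0 le_rfl

-- the fold of A's step equals the five backward searches, fieldwise
theorem pbFold_fields : ∀ (l : List (String × String)),
    l.foldl pbStep2 ⟨"", "", "", "", ""⟩ =
      ⟨pbClean (pbG l "Status"), pbCleanPrice (pbG l "Price/Sq Ft"),
       pbClean (pbG l "On realtor.com"), pbClean (pbG l "Type"), pbClean (pbG l "Built")⟩ := by
  intro l
  induction l using List.reverseRecOn with
  | nil => decide
  | append_singleton l p ih =>
    rw [List.foldl_append, List.foldl_cons, List.foldl_nil, ih]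
    have hG : ∀ lab, pbG (l ++ [p]) lab =
        (if pbClean p.1 == lab then p.2 else pbG l lab) := by
      intro lab
      simp only [pbG, List.reverse_append, List.reverse_singleton, List.singleton_append,
        List.find?]
      by_cases h : pbClean p.1 == lab
      · simp [h]
      · simp only [Bool.not_eq_true] at h
        simp [h]
    by_cases c1 : pbClean p.1 = "Status"
    · simp [pbStep2, hG, c1]
    by_cases c2 : pbClean p.1 = "Price/Sq Ft"
    · simp [pbStep2, hG, c2]
    by_cases c3 : pbClean p.1 = "On realtor.com"
    · simp [pbStep2, hG, c3]
    by_cases c4 : pbClean p.1 = "Type"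
    · simp [pbStep2, hG, c4]
    by_cases c5 : pbClean p.1 = "Built"
    · simp [pbStep2, hG, c5]
    · simp [pbStep2, hG, c1, c2, c3, c4, c5]

theorem pbLastVal_eq (x : List String) (lab : String) :
    pbLastVal x lab = pbG (x.zip x.tail) lab := by
  unfold pbLastVal pbG
  rw [PySem.List.slice_from x (by omega : (0:Int) ≤ 1)]
  simp

-- ===== VERDICT (by name: the statements are the Claim_ definitions above) =====
theorem parse_bottom_spec : Claim_equal_parse_bottom := by
  intro x _ hpre
  obtain ⟨hne, hlast⟩ := hpre
  unfold Spec_parse_bottom parse_bottom parse_bottom_alt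
  rw [pbFoldA_eq, pbZipSplit x hne, List.foldl_append]
  simp only [List.foldl_cons, List.foldl_nil]
  rw [pbStep2_last _ _ hlast, pbFold_fields,
    pbLastVal_eq, pbLastVal_eq, pbLastVal_eq, pbLastVal_eq, pbLastVal_eq]
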